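-- pv_equiv track=rewrite | github.com/TristHas/reversibility_paper | models.py | compute_features
-- ===== SOURCE A (Python) =====
-- def compute_features(infeats, pools):
--     features = [infeats]
--     for p in pools:
--         if p=="channel":
--             features+=[features[-1]*4]
--         else:
--             features+=[features[-1]]
--     return features
-- ===== SOURCE B (Python) =====
-- def compute_features(infeats, pools):
--     counts = [0]
--     c = 0
--     for p in pools:
--         if p == "channel":
--             c += 1
--         counts.append(c)
--     return [infeats * 4 ** k for k in counts]
-- ===== Notes on version B (the rewrite author's own statement) =====
-- stated objective: alternative
-- what changed: Replaces the dependent append-from-last-element chain by a prefix-count of 'channel' entries followed by an independent map infeats*4**k, so each feature is computed directly from infeats rather than from its predecessor.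
import Mathlib
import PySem

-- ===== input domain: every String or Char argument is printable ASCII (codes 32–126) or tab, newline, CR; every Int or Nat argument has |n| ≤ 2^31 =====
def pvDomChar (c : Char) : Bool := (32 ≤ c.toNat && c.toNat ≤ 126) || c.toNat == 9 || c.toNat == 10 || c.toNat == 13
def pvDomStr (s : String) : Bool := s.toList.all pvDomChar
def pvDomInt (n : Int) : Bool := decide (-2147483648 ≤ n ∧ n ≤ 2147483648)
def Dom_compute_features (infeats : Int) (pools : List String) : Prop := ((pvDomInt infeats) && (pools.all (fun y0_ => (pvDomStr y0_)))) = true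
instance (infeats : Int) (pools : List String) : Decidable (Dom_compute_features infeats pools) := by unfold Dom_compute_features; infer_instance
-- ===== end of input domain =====

-- B replaces A's dependent multiply-or-copy chain by a prefix-count of "channel" plus an independent power map (alternative decomposition, same cost).


-- ===== PORT A =====
-- literal port: features = [infeats]; append features[-1]*4 or features[-1] per pool
def compute_features (infeats : Int) (pools : List String) : List Int :=
  pools.foldl (fun features p =>
    if p == "channel" then
      features ++ [(PySem.List.pyGet? features (-1)).getD 0 * 4]
    else
      features ++ [(PySem.List.pyGet? features (-1)).getD 0]) [infeats]

-- ===== PORT B =====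
-- prefix counts of "channel": counts = [0]; running c appended after each pool
def cf_counts (pools : List String) : List Nat :=
  (pools.foldl (fun (st : List Nat × Nat) p =>
    let c' := if p == "channel" then st.2 + 1 else st.2
    (st.1 ++ [c'], c')) ([0], 0)).1

def compute_features_alt (infeats : Int) (pools : List String) : List Int :=
  (cf_counts pools).map (fun k => infeats * 4 ^ k)

-- ===== PRECONDITION & SPEC =====
def Spec_compute_features (infeats : Int) (pools : List String) (out : List Int) : Prop := out = compute_features_alt infeats pools
instance (infeats : Int) (pools : List String) (out : List Int) : Decidable (Spec_compute_features infeats pools out) := by unfold Spec_compute_features; infer_instance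

-- ===== CLAIM (what is proved, stated in full; the proofs are below) =====
def Claim_equal_compute_features : Prop := ∀ (infeats : Int) (pools : List String), Dom_compute_features infeats pools → Spec_compute_features infeats pools (compute_features infeats pools)

-- ===== LEMMAS AND PROOFS =====

-- common recursive characterisation: the tail of the feature chain starting from x
def cf_chain (x : Int) : List String → List Int
  | [] => []
  | p :: ps => let y := if p == "channel" then x * 4 else x; y :: cf_chain y ps

def cf_chainN (c : Nat) : List String → List Nat
  | [] => []
  | p :: ps => let c' := if p == "channel" then c + 1 else c; c' :: cf_chainN c' ps

theorem cf_A_inv (pools : List String) (acc : List Int) (x : Int) (h : acc.getLast? = some x) :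
    pools.foldl (fun features p =>
      if p == "channel" then
        features ++ [(PySem.List.pyGet? features (-1)).getD 0 * 4]
      else
        features ++ [(PySem.List.pyGet? features (-1)).getD 0]) acc = acc ++ cf_chain x pools := by
  induction pools generalizing acc x with
  | nil => simp [cf_chain]
  | cons p ps ih =>
    have hget : (PySem.List.pyGet? acc (-1)).getD 0 = x := by
      rw [PySem.List.pyGet?_neg_one, h]; rfl
    by_cases hp : (p == "channel") = true
    · simp only [List.foldl_cons, hget, cf_chain, if_pos hp]
      rw [ih (acc ++ [x * 4]) (x * 4) (by simp), List.append_assoc]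
      simp
    · simp only [List.foldl_cons, hget, cf_chain, if_neg hp]
      rw [ih (acc ++ [x]) x (by simp), List.append_assoc]
      simp

theorem cf_B_inv (pools : List String) (cs : List Nat) (c : Nat) :
    (pools.foldl (fun (st : List Nat × Nat) p =>
      let c' := if p == "channel" then st.2 + 1 else st.2
      (st.1 ++ [c'], c')) (cs, c)).1 = cs ++ cf_chainN c pools := by
  induction pools generalizing cs c with
  | nil => simp [cf_chainN]
  | cons p ps ih =>
    by_cases hp : (p == "channel") = true
    · simp only [List.foldl_cons, cf_chainN, if_pos hp]
      rw [ih, List.append_assoc]; simp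
    · simp only [List.foldl_cons, cf_chainN, if_neg hp]
      rw [ih, List.append_assoc]; simp

theorem cf_chain_eq_map (infeats : Int) (pools : List String) (c : Nat) :
    (cf_chainN c pools).map (fun k => infeats * 4 ^ k) = cf_chain (infeats * 4 ^ c) pools := by
  induction pools generalizing c with
  | nil => simp [cf_chain, cf_chainN]
  | cons p ps ih =>
    by_cases hp : (p == "channel") = true
    · simp only [cf_chain, cf_chainN, List.map_cons, if_pos hp]
      rw [ih, pow_succ]; ring_nf
    · simp only [cf_chain, cf_chainN, List.map_cons, if_neg hp]
      rw [ih]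

-- ===== VERDICT (by name: the statement is the Claim_ definition above) =====
theorem compute_features_spec : Claim_equal_compute_features := by
  intro infeats pools _
  unfold Spec_compute_features compute_features compute_features_alt cf_counts
  rw [cf_A_inv pools [infeats] infeats (by simp), cf_B_inv, List.map_append,
    cf_chain_eq_map infeats _ 0]
  simp
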